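-- pv_equiv track=rewrite | github.com/Taishi-N324/quantum-mechanical-simulations | HarmonicOscillator/TimeEvolutionSingleEnergy/single_energy.py | hpn_calc
-- ===== SOURCE A (Python) =====
-- def hpn_calc(x, n):
--     """
--     Calculate the value of the Hermite polynomial of degree n at x.
--     """
--     if n == 0:
--         return 1
--     elif n == 1:
--         return 2 * x
--     else:
--         memo = [0] * (n+1)
--         memo[0] = 1
--         memo[1] = 2 * x
--
--         for i in range(2, n+1):
--             memo[i] = 2 * x * memo[i-1] - 2 * (i-1) * memo[i-2]
--         return memo[n]
-- ===== SOURCE B (Python) =====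
-- def hpn_calc(x, n):
--     """
--     Calculate the value of the Hermite polynomial of degree n at x from the
--     explicit expansion H_n(x) = sum_m (-1)^m n!/(m!(n-2m)!) (2x)^(n-2m),
--     evaluated by Horner's rule in u = (2x)^2 with the coefficient
--     n!/(m!(n-2m)!) updated incrementally (all divisions are exact).
--     """
--     q, r = divmod(n, 2)
--     u = 4 * x * x
--     c = 1
--     acc = 1
--     for m in range(1, q + 1):
--         c = c * (n - 2 * m + 2) * (n - 2 * m + 1) // m
--         acc = acc * u + (-1) ** m * c
--     return acc * (2 * x) ** r
-- ===== Notes on version B (the rewrite author's own statement) =====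
-- stated objective: alternative
-- what changed: Replaces the recurrence-table dynamic programming with the explicit closed-form expansion H_n(x) = sum_m (-1)^m n!/(m!(n-2m)!) (2x)^(n-2m), evaluated by Horner's rule in u=(2x)^2 with the binomial-style coefficient updated by one exact multiply/divide per term.
import Mathlib
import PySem

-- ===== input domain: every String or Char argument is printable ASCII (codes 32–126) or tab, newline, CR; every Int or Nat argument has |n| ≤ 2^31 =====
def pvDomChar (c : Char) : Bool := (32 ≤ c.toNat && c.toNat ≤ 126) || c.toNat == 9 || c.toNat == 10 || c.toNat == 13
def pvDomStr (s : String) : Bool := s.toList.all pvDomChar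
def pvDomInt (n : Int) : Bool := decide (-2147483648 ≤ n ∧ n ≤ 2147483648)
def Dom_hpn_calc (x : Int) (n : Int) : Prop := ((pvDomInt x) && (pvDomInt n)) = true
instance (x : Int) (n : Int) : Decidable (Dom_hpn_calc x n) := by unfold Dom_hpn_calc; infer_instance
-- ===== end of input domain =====

-- B replaces A's recurrence-table DP with the explicit closed-form expansion
-- H_n(x) = Σ_m (-1)^m n!/(m!(n-2m)!) (2x)^(n-2m), evaluated by Horner's rule
-- in u = (2x)^2 with the coefficient updated incrementally (alternative algorithm, exact in integers).

-- ===== PORT A =====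
-- literal transliteration of A: memo table memo[0..n] filled left to right, result memo[n]
def hpn_calc (x : Int) (n : Int) : Int :=
  if n == 0 then 1
  else if n == 1 then 2 * x
  else
    let memo : List Int := List.replicate (n + 1).toNat 0
    let memo := PySem.List.pySetD memo 0 1
    let memo := PySem.List.pySetD memo 1 (2 * x)
    let memo := (PySem.List.pyRange 2 (n + 1) 1).foldl
      (fun memo i =>
        PySem.List.pySetD memo i
          (2 * x * PySem.List.pyGetD memo (i - 1) 0 - 2 * (i - 1) * PySem.List.pyGetD memo (i - 2) 0))
      memo
    PySem.List.pyGetD memo n 0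

-- ===== PORT B =====
-- literal transliteration of B: q, r = divmod(n, 2); Horner loop over m = 1..q updating the
-- coefficient c by an exact `//`; the exponents m and r are nonnegative wherever the loop body
-- resp. the final power is evaluated, so Python's `**` is ported as `^ ·.toNat` (exact there)
def hpn_calc_alt (x : Int) (n : Int) : Int :=
  let q := PySem.Int.floordiv n 2
  let r := PySem.Int.mod n 2
  let u := 4 * x * x
  let ca := (PySem.List.pyRange 1 (q + 1) 1).foldl
    (fun (ca : Int × Int) m =>
      let c := PySem.Int.floordiv (ca.1 * (n - 2 * m + 2) * (n - 2 * m + 1)) m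
      (c, ca.2 * u + (-1) ^ m.toNat * c))
    (1, 1)
  ca.2 * (2 * x) ^ r.toNat

-- ===== PRECONDITION & SPEC =====
-- A raises IndexError for n < 0 (memo = [0]*(n+1) is empty there, so memo[0] = 1 fails); those inputs are excluded.
def Pre_hpn_calc (x : Int) (n : Int) : Prop := 0 ≤ n
instance (x : Int) (n : Int) : Decidable (Pre_hpn_calc x n) := by unfold Pre_hpn_calc; infer_instance
def pvWitness_hpn_calc : Int × Int := (3, 4)

def Spec_hpn_calc (x : Int) (n : Int) (out : Int) : Prop := out = hpn_calc_alt x n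
instance (x : Int) (n : Int) (out : Int) : Decidable (Spec_hpn_calc x n out) := by unfold Spec_hpn_calc; infer_instance

-- ===== CLAIM (what is proved, stated in full; the proofs are below) =====
def Claim_equal_hpn_calc : Prop := ∀ (x : Int) (n : Int), Dom_hpn_calc x n → Pre_hpn_calc x n → Spec_hpn_calc x n (hpn_calc x n)

-- ===== LEMMAS AND PROOFS =====

-- mathematical reference: the Hermite recurrence H_0 = 1, H_1 = 2x, H_{m+2} = 2x·H_{m+1} - 2(m+1)·H_m
def Hm (x : Int) : Nat → Int
  | 0 => 1
  | 1 => 2 * x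
  | (m + 2) => 2 * x * Hm x (m + 1) - 2 * ((m : Int) + 1) * Hm x m

-- ---------- A-side: the memo loop computes Hm ----------

-- the table A's loop starts from: [1, 2x, 0, …, 0] of length N+1
def memoInit (x : Int) (N : Nat) : List Int :=
  PySem.List.pySetD (PySem.List.pySetD (List.replicate (N + 1) 0) 0 1) 1 (2 * x)

-- A's loop invariant: after processing 2..m the table holds Hm at 0..m and keeps its length
lemma loopA (x : Int) (N : Nat) (hN : 2 ≤ N) (m : Nat) (h1 : 1 ≤ m) (hm : m ≤ N) :
    ((PySem.List.pyRange 2 ((m : Int) + 1) 1).foldl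
      (fun memo i =>
        PySem.List.pySetD memo i
          (2 * x * PySem.List.pyGetD memo (i - 1) 0 - 2 * (i - 1) * PySem.List.pyGetD memo (i - 2) 0))
      (memoInit x N)).length = N + 1
    ∧ ∀ j : Nat, j ≤ m →
      PySem.List.pyGetD
        ((PySem.List.pyRange 2 ((m : Int) + 1) 1).foldl
          (fun memo i =>
            PySem.List.pySetD memo i
              (2 * x * PySem.List.pyGetD memo (i - 1) 0 - 2 * (i - 1) * PySem.List.pyGetD memo (i - 2) 0))
          (memoInit x N)) (j : Int) 0 = Hm x j := by
  induction m with
  | zero => omega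
  | succ m ih =>
    by_cases hm1 : m = 0
    · subst hm1
      rw [show (((0:Nat) + 1 : Nat) : Int) + 1 = 2 by norm_num,
        PySem.List.pyRange_one_eq_nil (by norm_num)]
      simp only [List.foldl_nil]
      constructor
      · simp [memoInit, PySem.List.length_pySetD]
      · intro j hj
        interval_cases j
        · rw [PySem.List.pyGetD_natCast]
          simp [memoInit, PySem.List.pySetD_of_nonneg, List.getD, Hm]
        · rw [PySem.List.pyGetD_natCast]
          have h0 : 0 < N := by omega
          simp [memoInit, PySem.List.pySetD_of_nonneg, List.getD, Hm, h0]
    · obtain ⟨q, rfl⟩ : ∃ q, m = q + 1 := ⟨m - 1, by omega⟩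
      obtain ⟨hlen, hget⟩ := ih (by omega) (by omega)
      rw [show (((q + 1 + 1 : Nat)) : Int) + 1 = (((q + 1 : Nat) : Int) + 1) + 1 by push_cast; ring,
        PySem.List.pyRange_one_succ_right (by push_cast; omega), List.foldl_append]
      simp only [List.foldl_cons, List.foldl_nil]
      set L := ((PySem.List.pyRange 2 (((q + 1 : Nat) : Int) + 1) 1).foldl
          (fun memo i =>
            PySem.List.pySetD memo i
              (2 * x * PySem.List.pyGetD memo (i - 1) 0 - 2 * (i - 1) * PySem.List.pyGetD memo (i - 2) 0))
          (memoInit x N)) with hL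
      have e1 : ((q + 1 : Nat) : Int) + 1 - 1 = ((q + 1 : Nat) : Int) := by ring
      have e2 : ((q + 1 : Nat) : Int) + 1 - 2 = ((q : Nat) : Int) := by push_cast; ring
      have e3 : ((q + 1 : Nat) : Int) + 1 = ((q + 2 : Nat) : Int) := by push_cast; ring
      rw [e1, e2, e3]
      have hv1 : PySem.List.pyGetD L ((q + 1 : Nat) : Int) 0 = Hm x (q + 1) := hget (q+1) (le_refl _)
      have hv2 : PySem.List.pyGetD L ((q : Nat) : Int) 0 = Hm x q := hget q (by omega)
      rw [hv1, hv2]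
      have hval : 2 * x * Hm x (q + 1) - 2 * ((q + 1 : Nat) : Int) * Hm x q = Hm x (q + 2) := by
        rw [show Hm x (q + 2) = 2 * x * Hm x (q + 1) - 2 * ((q : Int) + 1) * Hm x q from rfl]
        push_cast; ring
      rw [hval]
      have hlt : q + 2 < L.length := by omega
      constructor
      · rw [PySem.List.length_pySetD, hlen]
      · intro j hj
        rw [PySem.List.pyGetD_pySetD_natCast _ _ _ _ _ hlt]
        by_cases hje : j = q + 2
        · simp [hje]
        · rw [if_neg hje]
          exact hget j (by omega)

-- ---------- B-side: the Horner sum computes Hm ----------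

-- the integer coefficient n!/(m!(n-2m)!) in divisibility-free form (0 when 2m > n)
def cN (n m : Nat) : Nat := Nat.choose n (2*m) * Nat.choose (2*m) m * Nat.factorial m

lemma cN_zero (n : Nat) : cN n 0 = 1 := by simp [cN, Nat.factorial]

lemma cN_of_gt (n m : Nat) (h : n < 2*m) : cN n m = 0 := by
  simp [cN, Nat.choose_eq_zero_of_lt h]

-- n!/(m!(n-2m)!) · (m!(n-2m)!) = n!
lemma cN_mul_fact (n m : Nat) (h : 2*m ≤ n) :
    cN n m * (Nat.factorial m * Nat.factorial (n - 2*m)) = Nat.factorial n := by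
  have h1 := Nat.choose_mul_factorial_mul_factorial h
  have h2 := Nat.choose_mul_factorial_mul_factorial (show m ≤ 2*m by omega)
  have e : 2*m - m = m := by omega
  rw [e] at h2
  calc cN n m * (Nat.factorial m * Nat.factorial (n - 2*m))
      = Nat.choose n (2*m) * (Nat.choose (2*m) m * Nat.factorial m * Nat.factorial m)
          * Nat.factorial (n - 2*m) := by unfold cN; ring
    _ = Nat.choose n (2*m) * Nat.factorial (2*m) * Nat.factorial (n - 2*m) := by rw [h2]
    _ = Nat.factorial n := h1

-- the upward coefficient step used by B's loop: c_{k} (n-2k)(n-2k-1) = c_{k+1} (k+1)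
lemma cN_step (n k : Nat) (h : 2*(k+1) ≤ n) :
    cN n k * (n - 2*k) * (n - 2*k - 1) = cN n (k+1) * (k+1) := by
  obtain ⟨s, hs⟩ : ∃ s, n - 2*k = s + 2 := ⟨n - 2*k - 2, by omega⟩
  have hK : 0 < Nat.factorial k * Nat.factorial s :=
    Nat.mul_pos (Nat.factorial_pos k) (Nat.factorial_pos s)
  apply Nat.eq_of_mul_eq_mul_right hK
  have hs2 : n - 2*(k+1) = s := by omega
  have hs1 : n - 2*k - 1 = s + 1 := by omega
  have l1 : cN n k * (Nat.factorial k * Nat.factorial (n - 2*k)) = Nat.factorial n :=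
    cN_mul_fact n k (by omega)
  have l2 : cN n (k+1) * (Nat.factorial (k+1) * Nat.factorial s) = Nat.factorial n := by
    rw [← hs2]; exact cN_mul_fact n (k+1) h
  calc cN n k * (n - 2*k) * (n - 2*k - 1) * (Nat.factorial k * Nat.factorial s)
      = cN n k * (Nat.factorial k * ((s+2) * ((s+1) * Nat.factorial s))) := by
        rw [hs1, hs]; ring
    _ = cN n k * (Nat.factorial k * Nat.factorial (n - 2*k)) := by
        rw [hs]; rfl
    _ = Nat.factorial n := l1
    _ = cN n (k+1) * (Nat.factorial (k+1) * Nat.factorial s) := l2.symm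
    _ = cN n (k+1) * (k+1) * (Nat.factorial k * Nat.factorial s) := by
        rw [Nat.factorial_succ]; ring

-- the Pascal-style recurrence behind the Hermite three-term recurrence
lemma cN_rec (n m : Nat) (h : 2*m ≤ n) :
    cN (n+2) (m+1) = cN (n+1) (m+1) + 2*(n+1)*cN n m := by
  have hK : 0 < Nat.factorial (m+1) * Nat.factorial (n - 2*m) :=
    Nat.mul_pos (Nat.factorial_pos _) (Nat.factorial_pos _)
  apply Nat.eq_of_mul_eq_mul_right hK
  have l1 : cN (n+2) (m+1) * (Nat.factorial (m+1) * Nat.factorial (n - 2*m)) =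
      Nat.factorial (n+2) := by
    have := cN_mul_fact (n+2) (m+1) (by omega)
    rwa [show n + 2 - 2*(m+1) = n - 2*m by omega] at this
  have l2 : cN (n+1) (m+1) * (Nat.factorial (m+1) * Nat.factorial (n - 2*m)) =
      Nat.factorial (n+1) * (n - 2*m) := by
    by_cases hc : 2*(m+1) ≤ n+1
    · obtain ⟨s, hs⟩ : ∃ s, n - 2*m = s + 1 := ⟨n - 2*m - 1, by omega⟩
      have := cN_mul_fact (n+1) (m+1) hc
      rw [show n + 1 - 2*(m+1) = s by omega] at this
      calc cN (n+1) (m+1) * (Nat.factorial (m+1) * Nat.factorial (n - 2*m))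
          = cN (n+1) (m+1) * (Nat.factorial (m+1) * Nat.factorial s) * (s+1) := by
            rw [hs]; rw [show Nat.factorial (s+1) = (s+1) * Nat.factorial s from rfl]; ring
        _ = Nat.factorial (n+1) * (n - 2*m) := by rw [this, hs]
    · have hn : n = 2*m := by omega
      rw [cN_of_gt (n+1) (m+1) (by omega), hn]
      simp
  have l3 : 2*(n+1)*cN n m * (Nat.factorial (m+1) * Nat.factorial (n - 2*m)) =
      2*(n+1)*(m+1) * Nat.factorial n := by
    have := cN_mul_fact n m h
    calc 2*(n+1)*cN n m * (Nat.factorial (m+1) * Nat.factorial (n - 2*m))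
        = 2*(n+1)*(m+1) * (cN n m * (Nat.factorial m * Nat.factorial (n - 2*m))) := by
          rw [Nat.factorial_succ]; ring
      _ = 2*(n+1)*(m+1) * Nat.factorial n := by rw [this]
  rw [Nat.add_mul, l1, l2, l3]
  have e1 : Nat.factorial (n+2) = (n+2) * ((n+1) * Nat.factorial n) := rfl
  have e2 : Nat.factorial (n+1) = (n+1) * Nat.factorial n := rfl
  rw [e1, e2]
  have : (n - 2*m) + 2*(m+1) = n + 2 := by omega
  calc (n+2) * ((n+1) * Nat.factorial n)
      = ((n - 2*m) + 2*(m+1)) * ((n+1) * Nat.factorial n) := by rw [this]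
    _ = (n+1) * Nat.factorial n * (n - 2*m) + 2*(n+1)*(m+1) * Nat.factorial n := by ring

-- one term of the explicit expansion, and its partial sum S
def termI (x : Int) (n m : Nat) : Int := (-1)^m * (cN n m : Int) * (2*x)^(n - 2*m)

def Ssum (x : Int) (n : Nat) : Int := ∑ m ∈ Finset.range (n+1), termI x n m

lemma termI_of_gt (x : Int) (n m : Nat) (h : n < 2*m) : termI x n m = 0 := by
  simp [termI, cN_of_gt n m h]

-- the sum may stop at m = n/2: later terms vanish
lemma Ssum_eq_half (x : Int) (n : Nat) :
    Ssum x n = ∑ m ∈ Finset.range (n/2 + 1), termI x n m := by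
  unfold Ssum
  apply (Finset.sum_subset _ _).symm
  · intro m hm
    simp only [Finset.mem_range] at hm ⊢
    omega
  · intro m _ hm
    simp only [Finset.mem_range] at hm
    exact termI_of_gt x n m (by omega)

-- termwise three-term identity
lemma termI_step (x : Int) (n m : Nat) :
    termI x (n+2) (m+1) = 2*x * termI x (n+1) (m+1) - 2*((n:Int)+1) * termI x n m := by
  by_cases h : 2*m ≤ n
  · have hrec : ((cN (n+2) (m+1) : Int)) = (cN (n+1) (m+1) : Int) + 2*((n:Int)+1)*(cN n m : Int) := by
      have := cN_rec n m h
      push_cast [this]; ring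
    by_cases h1 : 2*(m+1) ≤ n+1
    · obtain ⟨d, hd⟩ : ∃ d, n - 2*m = d + 1 := ⟨n - 2*m - 1, by omega⟩
      unfold termI
      rw [show n + 2 - 2*(m+1) = d + 1 by omega, show n + 1 - 2*(m+1) = d by omega, hd, hrec]
      rw [pow_succ, pow_succ]
      ring
    · have hn : n = 2*m := by omega
      unfold termI
      rw [cN_of_gt (n+1) (m+1) (by omega)]
      rw [show n + 2 - 2*(m+1) = 0 by omega, show n - 2*m = 0 by omega, hrec,
        cN_of_gt (n+1) (m+1) (by omega)]
      push_cast
      ring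
  · rw [termI_of_gt x (n+2) (m+1) (by omega), termI_of_gt x (n+1) (m+1) (by omega),
      termI_of_gt x n m (by omega)]
    ring

-- S obeys the Hermite recurrence
lemma Ssum_rec (x : Int) (n : Nat) :
    Ssum x (n+2) = 2*x * Ssum x (n+1) - 2*((n:Int)+1) * Ssum x n := by
  have hzero : termI x (n+2) 0 = 2*x * termI x (n+1) 0 := by
    unfold termI
    rw [cN_zero, cN_zero]
    simp only [Nat.sub_zero, Nat.mul_zero]
    rw [show n + 2 = (n+1) + 1 from rfl, pow_succ]
    ring
  calc Ssum x (n+2)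
      = ∑ m ∈ Finset.range (n+2), termI x (n+2) (m+1) + termI x (n+2) 0 := by
        unfold Ssum; rw [Finset.sum_range_succ']
    _ = ∑ m ∈ Finset.range (n+2), (2*x * termI x (n+1) (m+1) - 2*((n:Int)+1) * termI x n m)
          + 2*x * termI x (n+1) 0 := by
        rw [hzero]
        congr 1
        exact Finset.sum_congr rfl (fun m _ => termI_step x n m)
    _ = 2*x * (∑ m ∈ Finset.range (n+2), termI x (n+1) (m+1) + termI x (n+1) 0)
          - 2*((n:Int)+1) * ∑ m ∈ Finset.range (n+2), termI x n m := by
        rw [Finset.sum_sub_distrib, ← Finset.mul_sum, ← Finset.mul_sum]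
        ring
    _ = 2*x * Ssum x (n+1) - 2*((n:Int)+1) * Ssum x n := by
        congr 1
        · congr 1
          unfold Ssum
          rw [← Finset.sum_range_succ']
          rw [show n + 1 + 1 + 1 = (n+1+1) + 1 from rfl, Finset.sum_range_succ,
            termI_of_gt x (n+1) (n+2) (by omega)]
          ring
        · congr 1
          unfold Ssum
          rw [show n + 2 = (n+1) + 1 from rfl, Finset.sum_range_succ,
            termI_of_gt x n (n+1) (by omega)]
          ring

lemma Ssum_eq_Hm (x : Int) : ∀ n : Nat, Ssum x n = Hm x n
  | 0 => by
      unfold Ssum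
      rw [Finset.sum_range_one]
      simp [termI, cN_zero, Hm]
  | 1 => by
      unfold Ssum
      rw [Finset.sum_range_succ, Finset.sum_range_one,
        termI_of_gt x 1 1 (by omega)]
      simp [termI, cN_zero, Hm]
  | (n+2) => by
      rw [Ssum_rec, Ssum_eq_Hm x (n+1), Ssum_eq_Hm x n]
      rfl

-- B's fold invariant: after m = 1..k the state is (coefficient c_k, Horner partial sum)
lemma foldB (x : Int) (N : Nat) (k : Nat) (hk : 2*k ≤ N) :
    (PySem.List.pyRange 1 ((k : Int) + 1) 1).foldl
      (fun (ca : Int × Int) m =>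
        ((PySem.Int.floordiv (ca.1 * ((N:Int) - 2 * m + 2) * ((N:Int) - 2 * m + 1)) m),
         ca.2 * (4*x*x) + (-1) ^ m.toNat *
           PySem.Int.floordiv (ca.1 * ((N:Int) - 2 * m + 2) * ((N:Int) - 2 * m + 1)) m))
      (1, 1)
    = ((cN N k : Int), ∑ m ∈ Finset.range (k+1), (-1)^m * (cN N m : Int) * (4*x*x)^(k-m)) := by
  induction k with
  | zero =>
    rw [show ((0:Nat):Int) + 1 = 1 by norm_num, PySem.List.pyRange_one_eq_nil (by norm_num)]
    simp [cN_zero]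
  | succ k ih =>
    have hk' : 2*k ≤ N := by omega
    rw [show (((k+1:Nat)):Int) + 1 = ((k:Int) + 1) + 1 by push_cast; ring,
      PySem.List.pyRange_one_succ_right (by omega), List.foldl_append, ih hk']
    simp only [List.foldl_cons, List.foldl_nil]
    have harg : (cN N k : Int) * ((N:Int) - 2 * ((k:Int)+1) + 2) * ((N:Int) - 2 * ((k:Int)+1) + 1)
        = ((cN N (k+1) * (k+1) : Nat) : Int) := by
      have e1 : (N:Int) - 2 * ((k:Int)+1) + 2 = ((N - 2*k : Nat) : Int) := by omega
      have e2 : (N:Int) - 2 * ((k:Int)+1) + 1 = ((N - 2*k - 1 : Nat) : Int) := by omega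
      rw [e1, e2, ← cN_step N k hk]
      push_cast; ring
    have hdiv : PySem.Int.floordiv
        ((cN N k : Int) * ((N:Int) - 2 * ((k:Int)+1) + 2) * ((N:Int) - 2 * ((k:Int)+1) + 1))
        ((k:Int)+1) = (cN N (k+1) : Int) := by
      rw [harg, PySem.Int.floordiv_eq_ediv_of_pos (by omega)]
      push_cast
      exact Int.mul_ediv_cancel _ (by omega)
    rw [hdiv]
    have htn : (((k:Int)+1)).toNat = k + 1 := by omega
    rw [htn, Prod.mk.injEq]
    refine ⟨rfl, ?_⟩
    · conv_rhs => rw [Finset.sum_range_succ]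
      congr 1
      · rw [Finset.sum_mul]
        apply Finset.sum_congr rfl
        intro m hm
        simp only [Finset.mem_range] at hm
        rw [show k + 1 - m = (k - m) + 1 by omega, pow_succ]
        ring
      · rw [Nat.sub_self, pow_zero]
        ring

-- B computes Hm on the naturals
lemma alt_eq_Hm (x : Int) (N : Nat) : hpn_calc_alt x (N : Int) = Hm x N := by
  unfold hpn_calc_alt
  have hq : PySem.Int.floordiv (N : Int) 2 = ((N/2 : Nat) : Int) :=
    PySem.Int.floordiv_natCast N 2
  have hr : PySem.Int.mod (N : Int) 2 = ((N % 2 : Nat) : Int) :=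
    PySem.Int.mod_natCast N 2
  simp only [hq, hr]
  rw [foldB x N (N/2) (by omega)]
  have htn : (((N % 2 : Nat) : Int)).toNat = N % 2 := by omega
  rw [htn, ← Ssum_eq_Hm, Ssum_eq_half, Finset.sum_mul]
  apply Finset.sum_congr rfl
  intro m hm
  simp only [Finset.mem_range] at hm
  unfold termI
  have hu : (4*x*x) = (2*x)^2 := by ring
  rw [hu, ← pow_mul, mul_assoc, ← pow_add]
  rw [show 2 * (N/2 - m) + N % 2 = N - 2*m by omega]

-- ===== VERDICT (by name: the statement is the Claim_ definition above) =====
set_option maxRecDepth 4096 in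
theorem hpn_calc_spec : Claim_equal_hpn_calc := by
  intro x n hdom hpre
  unfold Spec_hpn_calc
  obtain ⟨N, rfl⟩ : ∃ N : Nat, n = (N : Int) :=
    ⟨n.toNat, by unfold Pre_hpn_calc at hpre; omega⟩
  clear hdom hpre
  rw [alt_eq_Hm]
  match N with
  | 0 => simp [hpn_calc, Hm]
  | 1 => norm_num [hpn_calc, Hm]
  | (K + 2) =>
    unfold hpn_calc
    rw [if_neg (by simp only [beq_iff_eq]; omega), if_neg (by simp only [beq_iff_eq]; omega)]
    simp only []
    rw [show ((((K + 2 : Nat) : Int) + 1).toNat) = (K + 2) + 1 by push_cast; omega]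
    exact (loopA x (K + 2) (by omega) (K + 2) (by omega) (le_refl _)).2 (K + 2) (le_refl _)
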